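-- pv_equiv track=rewrite | github.com/lamelameo/Algorithms-Udacity-Misc | udacity_cs215.py | highest_post_order
-- ===== SOURCE A (Python) =====
-- def highest_post_order(S, root, po):
--     # return a mapping of the nodes in S
--     # to the highest post order value
--     # below that node
--     # (and you're allowed to follow 1 red edge)
--
--     hpo = {}
--
--     # make list length of po dict, then insert each key into it in the order based on its po value
--     ordered_po = ["" for _ in range(len(po))]
--     for node in po:
--         # replace the list item at the index of the node's post order value
--         ordered_po[po[node] - 1] = node
--
--     # use sorted list to run through nodes in post order
--     for node in ordered_po:
--         node_hpo = po[node]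
--         # check all neighbours
--         for neighbour in S[node]:
--             # check green neighbours only if they are children of node
--             if S[node][neighbour] == "green" and po[neighbour] < po[node]:
--                 # check child's hpo (will be set already), if it is higher than the current hpo, then update
--                 if hpo[neighbour] > node_hpo:
--                     node_hpo = hpo[neighbour]
--             # any red neighbour, check if its po is higher than current hpo, then update
--             elif S[node][neighbour] == "red" and po[neighbour] > node_hpo:
--                 node_hpo = po[neighbour]
--         hpo[node] = node_hpo  # add highest post order of node to a dict to be returned
--     return hpo
-- ===== SOURCE B (Python) =====
-- def highest_post_order(S, root, po):
--     # recursive memoized DFS over green child edges instead of pre-bucketing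
--     # nodes into a post-order array and sweeping it; seeding the DFS in
--     # increasing post-order (via an inverted value->node dict) keeps the
--     # returned dict in the same insertion order as A.
--     memo = {}
--     inv = {v: node for node, v in po.items()}
--
--     def hpo(node):
--         if node in memo:
--             return memo[node]
--         v = po[node]
--         for nb in S[node]:
--             color = S[node][nb]
--             if color == "green" and po[nb] < po[node]:
--                 v = max(v, hpo(nb))
--             elif color == "red":
--                 v = max(v, po[nb])
--         memo[node] = v
--         return v
--
--     for v in range(1, len(po) + 1):
--         hpo(inv[v])
--     return memo
-- ===== Notes on version B (the rewrite author's own statement) =====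
-- stated objective: alternative
-- what changed: A bucket-places nodes into a post-order array and sweeps it bottom-up; B computes each node's value by a recursive memoized DFS over green child edges, seeded in increasing post-order via an inverted value->node dict.
-- outside the precondition, e.g. on highest_post_order({'': {}}, 'a', {'': 0}): A returns {'': 0}, B raises KeyError
import Mathlib
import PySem

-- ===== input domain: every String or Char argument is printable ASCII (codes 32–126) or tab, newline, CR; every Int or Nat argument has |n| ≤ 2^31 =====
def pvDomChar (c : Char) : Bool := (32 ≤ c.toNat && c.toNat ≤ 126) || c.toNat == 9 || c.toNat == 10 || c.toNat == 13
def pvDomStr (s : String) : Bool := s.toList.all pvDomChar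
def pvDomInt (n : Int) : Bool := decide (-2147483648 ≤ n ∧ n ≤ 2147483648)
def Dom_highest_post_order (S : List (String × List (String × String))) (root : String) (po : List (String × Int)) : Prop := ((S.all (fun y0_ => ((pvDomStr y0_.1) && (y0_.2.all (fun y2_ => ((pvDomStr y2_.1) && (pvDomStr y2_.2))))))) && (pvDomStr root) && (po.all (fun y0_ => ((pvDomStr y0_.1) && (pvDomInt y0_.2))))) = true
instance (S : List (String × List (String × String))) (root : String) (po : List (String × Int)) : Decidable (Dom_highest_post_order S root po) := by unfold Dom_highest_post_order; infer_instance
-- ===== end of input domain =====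

-- B replaces A's bucket-place-into-array bottom-up sweep by a recursive memoized
-- DFS over green child edges, seeded in increasing post-order through an inverted
-- value->node dict (alternative decomposition, same result incl. insertion order).


-- shared dict-lookup helpers: Python d[k] = first match in the association list
-- (the .getD defaults are unreachable under Pre_)
def pvLookupI (po : List (String × Int)) (k : String) : Int :=
  ((po.find? (fun p => p.1 == k)).map (·.2)).getD 0
def pvLookupS (S : List (String × List (String × String))) (k : String) : List (String × String) :=
  ((S.find? (fun p => p.1 == k)).map (·.2)).getD []
def pvLookupC (adj : List (String × String)) (k : String) : String :=
  ((adj.find? (fun p => p.1 == k)).map (·.2)).getD ""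

-- ===== PORT A =====
def highest_post_order (S : List (String × List (String × String))) (root : String) (po : List (String × Int)) : List (String × Int) :=
  -- ordered_po = ["" for _ in range(len(po))]; for node in po: ordered_po[po[node]-1] = node
  let ordered_po := po.foldl (fun arr p => PySem.List.pySetD arr (pvLookupI po p.1 - 1) p.1)
      (List.replicate po.length "")
  -- for node in ordered_po: … (hpo accumulated as a dict)
  let hpo := ordered_po.foldl (fun (hpo : PySem.Dict String Int) node =>
      let adj := pvLookupS S node
      let node_hpo := adj.foldl (fun node_hpo nb =>
          if pvLookupC adj nb.1 = "green" ∧ pvLookupI po nb.1 < pvLookupI po node then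
            (if hpo.getD nb.1 0 > node_hpo then hpo.getD nb.1 0 else node_hpo)
          else if pvLookupC adj nb.1 = "red" ∧ pvLookupI po nb.1 > node_hpo then
            pvLookupI po nb.1
          else node_hpo)
        (pvLookupI po node)
      hpo.insert node node_hpo)
    PySem.Dict.empty
  hpo.items

-- ===== PORT B =====
-- Source B's recursive hpo(); the fuel bounds the recursion depth (in Source B the
-- post-order value strictly decreases along green child calls, so depth ≤ len(po))
def pvHpoB (S : List (String × List (String × String))) (po : List (String × Int)) :
    Nat → PySem.Dict String Int → String → PySem.Dict String Int × Int
  | 0, memo, _ => (memo, 0)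
  | fuel+1, memo, node =>
    match memo.get? node with
    | some v => (memo, v)
    | none =>
      let adj := pvLookupS S node
      let st := adj.foldl (fun (st : PySem.Dict String Int × Int) nb =>
          if pvLookupC adj nb.1 = "green" ∧ pvLookupI po nb.1 < pvLookupI po node then
            let r := pvHpoB S po fuel st.1 nb.1
            (r.1, max st.2 r.2)
          else if pvLookupC adj nb.1 = "red" then
            (st.1, max st.2 (pvLookupI po nb.1))
          else st)
        (memo, pvLookupI po node)
      (st.1.insert node st.2, st.2)

def highest_post_order_alt (S : List (String × List (String × String))) (root : String) (po : List (String × Int)) : List (String × Int) :=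
  -- inv = {v: node for node, v in po.items()}
  let inv := po.foldl (fun (d : PySem.Dict Int String) p => d.insert p.2 p.1) PySem.Dict.empty
  -- for v in range(1, len(po) + 1): hpo(inv[v]); return memo
  ((PySem.List.pyRange 1 (po.length + 1) 1).foldl
      (fun memo v => (pvHpoB S po (po.length + 1) memo (inv.getD v "")).1)
      (PySem.Dict.empty : PySem.Dict String Int)).items

-- ===== PRECONDITION & SPEC =====
-- Pre_ is the natural domain of A: po maps each node to a post-order value, the
-- values being exactly 1..len(po) (otherwise A's bucket array keeps "" and S[""] /
-- po[""] raises KeyError, or — if "" happens to be a node — A silently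
-- drops/duplicates nodes, an accident of the bucket overwrite order); every po key
-- must be in S and every green/red neighbour of a po key must be in po (else
-- KeyError); dict arguments have unique keys (a Python dict cannot have duplicates).
def Pre_highest_post_order (S : List (String × List (String × String))) (root : String) (po : List (String × Int)) : Prop :=
  (po.map (·.1)).Nodup ∧
  (po.map (·.2)).Perm ((List.range po.length).map (fun i : Nat => (i + 1 : Int))) ∧
  (S.map (·.1)).Nodup ∧
  (∀ e ∈ S, (e.2.map (·.1)).Nodup) ∧
  (∀ p ∈ po, p.1 ∈ S.map (·.1)) ∧
  (∀ p ∈ po, ∀ q ∈ pvLookupS S p.1, (q.2 = "green" ∨ q.2 = "red") → q.1 ∈ po.map (·.1))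
instance (S : List (String × List (String × String))) (root : String) (po : List (String × Int)) : Decidable (Pre_highest_post_order S root po) := by unfold Pre_highest_post_order; infer_instance

def pvWitness_highest_post_order : (List (String × List (String × String))) × String × (List (String × Int)) :=
  ([("a", [("b", "green")]), ("b", [])], "a", [("a", 2), ("b", 1)])

def Spec_highest_post_order (S : List (String × List (String × String))) (root : String) (po : List (String × Int)) (out : List (String × Int)) : Prop := out = highest_post_order_alt S root po
instance (S : List (String × List (String × String))) (root : String) (po : List (String × Int)) (out : List (String × Int)) : Decidable (Spec_highest_post_order S root po out) := by unfold Spec_highest_post_order; infer_instance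

-- ===== CLAIM (what is proved, stated in full; the proofs are below) =====
def Claim_equal_highest_post_order : Prop := ∀ (S : List (String × List (String × String))) (root : String) (po : List (String × Int)), Dom_highest_post_order S root po → Pre_highest_post_order S root po → Spec_highest_post_order S root po (highest_post_order S root po)

-- ===== LEMMAS AND PROOFS =====

theorem pv_find_self {β : Type} (l : List (String × β)) (hn : (l.map (·.1)).Nodup)
    (p : String × β) (hp : p ∈ l) : l.find? (fun q => q.1 == p.1) = some p := by
  induction l with
  | nil => cases hp
  | cons q t ih =>
    simp only [List.map_cons, List.nodup_cons] at hn
    rcases List.mem_cons.1 hp with h | h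
    · subst h; rw [List.find?_cons_of_pos (h := by simp)]
    · have hm : p.1 ∈ t.map (·.1) := List.mem_map_of_mem h
      rw [List.find?_cons_of_neg (h := by simp only [beq_iff_eq]; intro he; exact hn.1 (he ▸ hm))]
      exact ih hn.2 h

theorem pv_fill_length (l : List (String × Int)) (arr : List String) :
    (l.foldl (fun a p => PySem.List.pySetD a (p.2 - 1) p.1) arr).length = arr.length := by
  induction l generalizing arr with
  | nil => rfl
  | cons p t ih => simp only [List.foldl_cons]; rw [ih]; exact PySem.List.length_pySetD _ _ _

theorem pv_fill_get (l : List (String × Int)) (hnv : (l.map (·.2)).Nodup)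
    (arr : List String) (hr : ∀ p ∈ l, 1 ≤ p.2 ∧ p.2 ≤ (arr.length : Int)) (i : Nat) :
    (l.foldl (fun a p => PySem.List.pySetD a (p.2 - 1) p.1) arr)[i]? =
      (match l.find? (fun p => p.2 == (i : Int) + 1) with
       | some p => some p.1
       | none => arr[i]?) := by
  induction l generalizing arr with
  | nil => simp
  | cons p t ih =>
    simp only [List.map_cons, List.nodup_cons] at hnv
    have hp := hr p (List.mem_cons_self ..)
    simp only [List.foldl_cons]
    rw [PySem.List.pySetD_of_nonneg _ _ (by omega)]
    have hlen : (arr.set (p.2 - 1).toNat p.1).length = arr.length := by simp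
    rw [ih hnv.2 _ (fun q hq => by rw [hlen]; exact hr q (List.mem_cons_of_mem _ hq))]
    by_cases hc : p.2 = (i : Int) + 1
    · rw [List.find?_cons_of_pos (h := by simp [hc])]
      have hfind : t.find? (fun q => q.2 == (i : Int) + 1) = none := by
        rw [List.find?_eq_none]
        intro q hq
        simp only [beq_iff_eq]
        intro hq2
        exact hnv.1 (hc ▸ hq2 ▸ List.mem_map_of_mem hq)
      rw [hfind]
      have : (p.2 - 1).toNat = i := by omega
      rw [this]
      exact List.getElem?_set_self (by omega)
    · rw [List.find?_cons_of_neg (h := by simp [hc])]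
      cases hf : t.find? (fun q => q.2 == (i : Int) + 1) with
      | some q => simp
      | none =>

        exact List.getElem?_set_ne (by omega)


theorem pv_lookupI_self (po : List (String × Int)) (hnk : (po.map (·.1)).Nodup)
    (p : String × Int) (hp : p ∈ po) : pvLookupI po p.1 = p.2 := by
  rw [pvLookupI, pv_find_self po hnk p hp]; rfl

-- find? by value: hits the unique pair with that value when values are distinct
theorem pv_find_by_val (l : List (String × Int)) (hnv : (l.map (·.2)).Nodup)
    (p : String × Int) (hp : p ∈ l) : l.find? (fun q => q.2 == p.2) = some p := by
  induction l with
  | nil => cases hp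
  | cons q t ih =>
    simp only [List.map_cons, List.nodup_cons] at hnv
    rcases List.mem_cons.1 hp with h | h
    · subst h; rw [List.find?_cons_of_pos (h := by simp)]
    · have hm : p.2 ∈ t.map (·.2) := List.mem_map_of_mem h
      rw [List.find?_cons_of_neg (h := by simp only [beq_iff_eq]; intro he; exact hnv.1 (he ▸ hm))]
      exact ih hnv.2 h

-- characterisation of A's bucket array under Pre_
theorem pv_oA_props (po : List (String × Int)) (hnk : (po.map (·.1)).Nodup)
    (hperm : (po.map (·.2)).Perm ((List.range po.length).map (fun i : Nat => (i + 1 : Int)))) :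
    (po.foldl (fun arr p => PySem.List.pySetD arr (pvLookupI po p.1 - 1) p.1)
        (List.replicate po.length "")).length = po.length ∧
    (∀ i, i < po.length → ∃ p ∈ po, p.2 = (i : Int) + 1 ∧
      (po.foldl (fun arr p => PySem.List.pySetD arr (pvLookupI po p.1 - 1) p.1)
        (List.replicate po.length ""))[i]? = some p.1) := by
  have hcong : po.foldl (fun arr p => PySem.List.pySetD arr (pvLookupI po p.1 - 1) p.1)
      (List.replicate po.length "") =
      po.foldl (fun a p => PySem.List.pySetD a (p.2 - 1) p.1) (List.replicate po.length "") := by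
    apply PySem.List.foldl_congr_mem
    intro acc p hp
    rw [pv_lookupI_self po hnk p hp]
  have hnv : (po.map (·.2)).Nodup := by
    refine hperm.nodup_iff.2 (List.Nodup.map ?_ List.nodup_range)
    intro a b hab; simp at hab; exact hab
  have hval : ∀ p ∈ po, 1 ≤ p.2 ∧ p.2 ≤ (po.length : Int) := by
    intro p hp
    have : p.2 ∈ (List.range po.length).map (fun i : Nat => (i + 1 : Int)) :=
      hperm.mem_iff.1 (List.mem_map_of_mem hp)
    simp only [List.mem_map, List.mem_range] at this
    obtain ⟨j, hj, hje⟩ := this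
    omega
  rw [hcong]
  constructor
  · rw [pv_fill_length]; simp
  · intro i hi
    have hval' : ∀ p ∈ po, 1 ≤ p.2 ∧ p.2 ≤ ((List.replicate po.length ("" : String)).length : Int) := by
      simpa using hval
    have hmem : ((i : Int) + 1) ∈ po.map (·.2) := by
      refine hperm.mem_iff.2 ?_
      exact List.mem_map_of_mem (List.mem_range.2 hi)
    simp only [List.mem_map] at hmem
    obtain ⟨p, hp, hpv⟩ := hmem
    refine ⟨p, hp, hpv, ?_⟩
    rw [pv_fill_get po hnv _ hval' i]
    rw [← hpv, pv_find_by_val po hnv p hp]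
  

theorem pv_vals_nodup (po : List (String × Int))
    (hperm : (po.map (·.2)).Perm ((List.range po.length).map (fun i : Nat => (i + 1 : Int)))) :
    (po.map (·.2)).Nodup := by
  refine hperm.nodup_iff.2 (List.Nodup.map ?_ List.nodup_range)
  intro a b hab; simp at hab; exact hab

theorem pv_val_range (po : List (String × Int))
    (hperm : (po.map (·.2)).Perm ((List.range po.length).map (fun i : Nat => (i + 1 : Int))))
    (p : String × Int) (hp : p ∈ po) : 1 ≤ p.2 ∧ p.2 ≤ (po.length : Int) := by
  have : p.2 ∈ (List.range po.length).map (fun i : Nat => (i + 1 : Int)) :=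
    hperm.mem_iff.1 (List.mem_map_of_mem hp)
  simp only [List.mem_map, List.mem_range] at this
  obtain ⟨j, hj, hje⟩ := this
  omega

-- list-level facts about A's bucket array
theorem pv_oA_facts (po : List (String × Int)) (hnk : (po.map (·.1)).Nodup)
    (hperm : (po.map (·.2)).Perm ((List.range po.length).map (fun i : Nat => (i + 1 : Int)))) :
    (po.foldl (fun arr p => PySem.List.pySetD arr (pvLookupI po p.1 - 1) p.1)
        (List.replicate po.length "")).Nodup ∧
    (po.foldl (fun arr p => PySem.List.pySetD arr (pvLookupI po p.1 - 1) p.1)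
        (List.replicate po.length "")).Pairwise (fun a b => pvLookupI po a < pvLookupI po b) ∧
    (∀ k, k ∈ (po.foldl (fun arr p => PySem.List.pySetD arr (pvLookupI po p.1 - 1) p.1)
        (List.replicate po.length "")) ↔ k ∈ po.map (·.1)) := by
  obtain ⟨hlen, hget⟩ := pv_oA_props po hnk hperm
  set oA := po.foldl (fun arr p => PySem.List.pySetD arr (pvLookupI po p.1 - 1) p.1)
      (List.replicate po.length "") with hoA
  have hgetE : ∀ (i : Nat), i < oA.length → ∃ p ∈ po, p.2 = (i : Int) + 1 ∧
      ∃ (hi : i < oA.length), oA[i] = p.1 := by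
    intro i hi
    obtain ⟨p, hp, hpv, hpe⟩ := hget i (by omega)
    rw [List.getElem?_eq_some_iff] at hpe
    exact ⟨p, hp, hpv, hpe⟩
  have hpw : oA.Pairwise (fun a b => pvLookupI po a < pvLookupI po b) := by
    rw [List.pairwise_iff_getElem]
    intro i j hi hj hij
    obtain ⟨p, hp, hpv, hi2, hpe⟩ := hgetE i hi
    obtain ⟨q, hq, hqv, hj2, hqe⟩ := hgetE j hj
    rw [hpe, hqe, pv_lookupI_self po hnk p hp, pv_lookupI_self po hnk q hq, hpv, hqv]
    omega
  have hnodupA : oA.Nodup := hpw.imp (fun {a b} h => by rintro rfl; exact absurd h (lt_irrefl _))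
  refine ⟨hnodupA, hpw, ?_⟩
  intro k
  constructor
  · intro hk
    obtain ⟨i, hi, he⟩ := List.mem_iff_getElem.1 hk
    obtain ⟨p, hp, hpv, hi2, hpe⟩ := hgetE i hi
    rw [← he, hpe]
    exact List.mem_map_of_mem hp
  · intro hk
    obtain ⟨p, hp, hpk⟩ := List.mem_map.1 hk
    have hvr := pv_val_range po hperm p hp
    have hi : (p.2 - 1).toNat < po.length := by omega
    obtain ⟨q, hq, hqv, hqe⟩ := hget (p.2 - 1).toNat hi
    have : q = p := by
      refine List.inj_on_of_nodup_map (pv_vals_nodup po hperm) hq hp ?_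
      omega
    subst this
    rw [← hpk]
    exact List.mem_of_getElem? hqe

-- dict lookup in Source B's inverted dict: the (unique) key holding that value
theorem pv_foldl_insert_get (l : List (String × Int)) (hnv : (l.map (·.2)).Nodup)
    (d : PySem.Dict Int String) (v : Int) :
    (l.foldl (fun d p => d.insert p.2 p.1) d).get? v =
      (match l.find? (fun p => p.2 == v) with
       | some p => some p.1
       | none => d.get? v) := by
  induction l generalizing d with
  | nil => rfl
  | cons p t ih =>
    simp only [List.map_cons, List.nodup_cons] at hnv
    simp only [List.foldl_cons]
    rw [ih hnv.2]
    by_cases hc : p.2 = v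
    · rw [List.find?_cons_of_pos (h := by simp [hc])]
      have hfind : t.find? (fun q => q.2 == v) = none := by
        rw [List.find?_eq_none]
        intro q hq
        simp only [beq_iff_eq]
        intro hq2
        exact hnv.1 (hc ▸ hq2 ▸ List.mem_map_of_mem hq)
      rw [hfind]
      rw [← hc]
      exact PySem.Dict.get?_insert_self d p.2 p.1
    · rw [List.find?_cons_of_neg (h := by simp [hc])]
      cases hf : t.find? (fun q => q.2 == v) with
      | some q => rfl
      | none => exact PySem.Dict.get?_insert_of_ne d p.1 (fun he => hc he.symm)

-- range(1, len(po)+1) written as a mapped List.range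
theorem pv_pyRange (n : Nat) :
    PySem.List.pyRange 1 ((n : Int) + 1) 1 =
      (List.range n).map (fun i : Nat => (i + 1 : Int)) := by
  rw [PySem.List.pyRange_of_pos _ _ (by norm_num)]
  have hcnt : (if (1 : Int) < (n : Int) + 1 then ((((n : Int) + 1) - 1 + 1 - 1) / 1).toNat else 0)
      = n := by split_ifs <;> omega
  rw [hcnt]
  exact List.map_congr_left (fun a _ => by ring)

-- B's seed sequence inv[1], …, inv[n] IS A's bucket array
theorem pv_order_eq (po : List (String × Int)) (hnk : (po.map (·.1)).Nodup)
    (hperm : (po.map (·.2)).Perm ((List.range po.length).map (fun i : Nat => (i + 1 : Int)))) :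
    (PySem.List.pyRange 1 ((po.length : Int) + 1) 1).map
        (fun v => (po.foldl (fun (d : PySem.Dict Int String) p => d.insert p.2 p.1)
          PySem.Dict.empty).getD v "") =
      po.foldl (fun arr p => PySem.List.pySetD arr (pvLookupI po p.1 - 1) p.1)
        (List.replicate po.length "") := by
  obtain ⟨hlen, hget⟩ := pv_oA_props po hnk hperm
  rw [pv_pyRange po.length, List.map_map]
  apply List.ext_getElem
  · simp [hlen]
  · intro i hi hj
    simp only [List.getElem_map, List.getElem_range, Function.comp_apply]
    have hi' : i < po.length := by simpa using hi
    obtain ⟨p, hp, hpv, hpe⟩ := hget i hi'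
    have hoAi : (po.foldl (fun arr p => PySem.List.pySetD arr (pvLookupI po p.1 - 1) p.1)
        (List.replicate po.length ""))[i] = p.1 := by
      rw [List.getElem?_eq_some_iff] at hpe
      exact hpe.choose_spec
    rw [hoAi, PySem.Dict.getD_eq_get?_getD,
      pv_foldl_insert_get po (pv_vals_nodup po hperm) PySem.Dict.empty ((i : Int) + 1),
      ← hpv, pv_find_by_val po (pv_vals_nodup po hperm) p hp]
    rfl

-- B's inner neighbour loop, when every green child is already memoised,
-- keeps the memo fixed and computes exactly A's inner loop
theorem pv_inner (S : List (String × List (String × String))) (po : List (String × Int))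
    (adj : List (String × String)) (node : String) (memo : PySem.Dict String Int) (f : Nat)
    (l : List (String × String))
    (hl : ∀ nb ∈ l, pvLookupC adj nb.1 = "green" → pvLookupI po nb.1 < pvLookupI po node →
        (memo.get? nb.1).isSome) :
    ∀ acc : Int,
      l.foldl (fun (st : PySem.Dict String Int × Int) nb =>
          if pvLookupC adj nb.1 = "green" ∧ pvLookupI po nb.1 < pvLookupI po node then
            let r := pvHpoB S po (f + 1) st.1 nb.1
            (r.1, max st.2 r.2)
          else if pvLookupC adj nb.1 = "red" then
            (st.1, max st.2 (pvLookupI po nb.1))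
          else st)
        (memo, acc) =
      (memo, l.foldl (fun node_hpo nb =>
          if pvLookupC adj nb.1 = "green" ∧ pvLookupI po nb.1 < pvLookupI po node then
            (if memo.getD nb.1 0 > node_hpo then memo.getD nb.1 0 else node_hpo)
          else if pvLookupC adj nb.1 = "red" ∧ pvLookupI po nb.1 > node_hpo then
            pvLookupI po nb.1
          else node_hpo) acc) := by
  induction l with
  | nil => intro acc; rfl
  | cons nb t ih =>
    intro acc
    have ih' := ih (fun x hx => hl x (List.mem_cons_of_mem _ hx))
    simp only [List.foldl_cons]
    by_cases h1 : pvLookupC adj nb.1 = "green" ∧ pvLookupI po nb.1 < pvLookupI po node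
    · obtain ⟨w, hw⟩ := Option.isSome_iff_exists.1 (hl nb (List.mem_cons_self ..) h1.1 h1.2)
      have hB : pvHpoB S po (f + 1) memo nb.1 = (memo, w) := by
        simp [pvHpoB, hw]
      rw [if_pos h1, if_pos h1, hB]
      have hD : memo.getD nb.1 0 = w := PySem.Dict.getD_of_get?_eq_some memo 0 hw
      have hmax : max acc w = if memo.getD nb.1 0 > acc then memo.getD nb.1 0 else acc := by
        rw [hD, max_def]; split_ifs <;> omega
      rw [← hmax] at *
      exact ih' (max acc w)
    · rw [if_neg h1, if_neg h1]
      by_cases h2 : pvLookupC adj nb.1 = "red"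
      · rw [if_pos h2]
        have hmax : max acc (pvLookupI po nb.1) =
            if pvLookupC adj nb.1 = "red" ∧ pvLookupI po nb.1 > acc then pvLookupI po nb.1
            else acc := by
          simp only [h2, true_and]
          rw [max_def]; split_ifs <;> omega
        rw [← hmax]
        exact ih' (max acc (pvLookupI po nb.1))
      · rw [if_neg h2, if_neg (by rintro ⟨hc, -⟩; exact h2 hc)]
        exact ih' acc

-- one call of Source B's hpo() on an unmemoised node whose green children are all
-- memoised: it inserts exactly A's value for the node
theorem pv_step (S : List (String × List (String × String))) (po : List (String × Int))
    (node : String) (memo : PySem.Dict String Int) (f : Nat)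
    (hnone : memo.get? node = none)
    (hl : ∀ nb ∈ pvLookupS S node, pvLookupC (pvLookupS S node) nb.1 = "green" →
        pvLookupI po nb.1 < pvLookupI po node → (memo.get? nb.1).isSome) :
    pvHpoB S po (f + 2) memo node =
      (memo.insert node ((pvLookupS S node).foldl (fun node_hpo nb =>
          if pvLookupC (pvLookupS S node) nb.1 = "green" ∧
              pvLookupI po nb.1 < pvLookupI po node then
            (if memo.getD nb.1 0 > node_hpo then memo.getD nb.1 0 else node_hpo)
          else if pvLookupC (pvLookupS S node) nb.1 = "red" ∧
              pvLookupI po nb.1 > node_hpo then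
            pvLookupI po nb.1
          else node_hpo) (pvLookupI po node)),
        (pvLookupS S node).foldl (fun node_hpo nb =>
          if pvLookupC (pvLookupS S node) nb.1 = "green" ∧
              pvLookupI po nb.1 < pvLookupI po node then
            (if memo.getD nb.1 0 > node_hpo then memo.getD nb.1 0 else node_hpo)
          else if pvLookupC (pvLookupS S node) nb.1 = "red" ∧
              pvLookupI po nb.1 > node_hpo then
            pvLookupI po nb.1
          else node_hpo) (pvLookupI po node)) := by
  have hred : pvHpoB S po (f + 2) memo node =
      (((pvLookupS S node).foldl (fun (st : PySem.Dict String Int × Int) (nb : String × String) =>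
          if pvLookupC (pvLookupS S node) nb.1 = "green" ∧ pvLookupI po nb.1 < pvLookupI po node then
            let r := pvHpoB S po (f + 1) st.1 nb.1
            (r.1, max st.2 r.2)
          else if pvLookupC (pvLookupS S node) nb.1 = "red" then
            (st.1, max st.2 (pvLookupI po nb.1))
          else st) (memo, pvLookupI po node)).1.insert node ((pvLookupS S node).foldl (fun (st : PySem.Dict String Int × Int) (nb : String × String) =>
          if pvLookupC (pvLookupS S node) nb.1 = "green" ∧ pvLookupI po nb.1 < pvLookupI po node then
            let r := pvHpoB S po (f + 1) st.1 nb.1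
            (r.1, max st.2 r.2)
          else if pvLookupC (pvLookupS S node) nb.1 = "red" then
            (st.1, max st.2 (pvLookupI po nb.1))
          else st) (memo, pvLookupI po node)).2, ((pvLookupS S node).foldl (fun (st : PySem.Dict String Int × Int) (nb : String × String) =>
          if pvLookupC (pvLookupS S node) nb.1 = "green" ∧ pvLookupI po nb.1 < pvLookupI po node then
            let r := pvHpoB S po (f + 1) st.1 nb.1
            (r.1, max st.2 r.2)
          else if pvLookupC (pvLookupS S node) nb.1 = "red" then
            (st.1, max st.2 (pvLookupI po nb.1))
          else st) (memo, pvLookupI po node)).2) := by rw [pvHpoB, hnone]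
  rw [hred]
  rw [pv_inner S po (pvLookupS S node) node memo f (pvLookupS S node) hl (pvLookupI po node)]

-- the two top-level loops, run over the same node order, build the same dict
theorem pv_main (S : List (String × List (String × String))) (po : List (String × Int))
    (hnk : (po.map (·.1)).Nodup)
    (hedges : ∀ p ∈ po, ∀ q ∈ pvLookupS S p.1, (q.2 = "green" ∨ q.2 = "red") →
        q.1 ∈ po.map (·.1)) :
    ∀ (rest done : List String) (memo : PySem.Dict String Int),
      (done ++ rest).Nodup →
      (done ++ rest).Pairwise (fun a b => pvLookupI po a < pvLookupI po b) →
      (∀ k ∈ done ++ rest, k ∈ po.map (·.1)) →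
      (∀ k ∈ po.map (·.1), k ∈ done ++ rest) →
      memo.keys = done →
      rest.foldl (fun (hpo : PySem.Dict String Int) node =>
          let adj := pvLookupS S node
          let node_hpo := adj.foldl (fun node_hpo nb =>
              if pvLookupC adj nb.1 = "green" ∧ pvLookupI po nb.1 < pvLookupI po node then
                (if hpo.getD nb.1 0 > node_hpo then hpo.getD nb.1 0 else node_hpo)
              else if pvLookupC adj nb.1 = "red" ∧ pvLookupI po nb.1 > node_hpo then
                pvLookupI po nb.1
              else node_hpo)
            (pvLookupI po node)
          hpo.insert node node_hpo) memo =
      rest.foldl (fun memo node => (pvHpoB S po (po.length + 1) memo node).1) memo := by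
  intro rest
  induction rest with
  | nil => intro done memo _ _ _ _ _; rfl
  | cons node rest' ih =>
    intro done memo hnd hpw hLK hKL hkeys
    have hnode_mem : node ∈ po.map (·.1) := hLK node (by simp)
    have hnotdone : node ∉ done := by
      have := List.disjoint_of_nodup_append hnd
      intro hc
      exact this hc (by simp)
    have hnone : memo.get? node = none :=
      (PySem.Dict.get?_eq_none_iff_not_mem_keys memo node).mpr (hkeys ▸ hnotdone)
    have hl : ∀ nb ∈ pvLookupS S node, pvLookupC (pvLookupS S node) nb.1 = "green" →
        pvLookupI po nb.1 < pvLookupI po node → (memo.get? nb.1).isSome := by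
      intro nb hnb hcol hlt
      -- the looked-up colour pair is a real green/red edge of node
      have hfind : (pvLookupS S node).find? (fun p => p.1 == nb.1) ≠ none := by
        intro hc
        rw [pvLookupC, hc] at hcol
        simp at hcol
      obtain ⟨q, hq⟩ := Option.ne_none_iff_exists'.1 hfind
      have hqmem : q ∈ pvLookupS S node := List.mem_of_find?_eq_some hq
      have hqkey : q.1 = nb.1 := by
        have := List.find?_some hq
        simpa using this
      have hqcol : q.2 = "green" := by
        rw [pvLookupC, hq] at hcol
        simpa using hcol
      obtain ⟨p, hp, hpk⟩ := List.mem_map.1 hnode_mem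
      have hqk : q.1 ∈ po.map (·.1) := by
        refine hedges p hp q ?_ (Or.inl hqcol)
        rw [hpk]; exact hqmem
      have hmemL : q.1 ∈ done ++ node :: rest' := hKL q.1 hqk
      have hdone : nb.1 ∈ done := by
        rw [hqkey] at hmemL
        rcases List.mem_append.1 hmemL with h | h
        · exact h
        · exfalso
          rcases List.mem_cons.1 h with h | h
          · rw [← h] at hlt; omega
          · have := (List.pairwise_append.1 hpw).2.1
            have h2 := (List.pairwise_cons.1 this).1 nb.1 h
            omega
      refine Option.isSome_iff_ne_none.2 (fun hc => ?_)
      rw [PySem.Dict.get?_eq_none_iff_not_mem_keys, hkeys] at hc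
      exact hc hdone
    have hlen : 1 ≤ po.length := by
      rcases po with _ | _
      · simp at hnode_mem
      · simp
    obtain ⟨f, hf⟩ : ∃ f, po.length + 1 = f + 2 := ⟨po.length - 1, by omega⟩
    simp only [List.foldl_cons]
    rw [hf, pv_step S po node memo f hnone hl]
    have hc : memo.contains node = false := by
      rw [PySem.Dict.contains_eq_isSome_get?, hnone]
      rfl
    have hkeys' : (memo.insert node ((pvLookupS S node).foldl (fun node_hpo nb =>
          if pvLookupC (pvLookupS S node) nb.1 = "green" ∧
              pvLookupI po nb.1 < pvLookupI po node then
            (if memo.getD nb.1 0 > node_hpo then memo.getD nb.1 0 else node_hpo)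
          else if pvLookupC (pvLookupS S node) nb.1 = "red" ∧
              pvLookupI po nb.1 > node_hpo then
            pvLookupI po nb.1
          else node_hpo) (pvLookupI po node))).keys = done ++ [node] := by
      rw [PySem.Dict.keys_insert_of_not_contains (h := hc), hkeys]
    rw [← hf]
    exact ih (done ++ [node]) _ (by simpa using hnd) (by simpa using hpw)
      (by simpa using hLK) (by simpa using hKL) hkeys'

-- ===== VERDICT (by name: the statement is the Claim_ definition above) =====
theorem highest_post_order_spec : Claim_equal_highest_post_order := by
  intro S root po _hdom hpre
  obtain ⟨hnk, hperm, _hSnd, _hinner, _hkeysS, hedges⟩ := hpre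
  unfold Spec_highest_post_order highest_post_order highest_post_order_alt
  refine congrArg PySem.Dict.items ?_
  obtain ⟨hnodupA, hpwA, hmemA⟩ := pv_oA_facts po hnk hperm
  calc (po.foldl (fun arr p => PySem.List.pySetD arr (pvLookupI po p.1 - 1) p.1)
          (List.replicate po.length "")).foldl (fun (hpo : PySem.Dict String Int) node =>
            let adj := pvLookupS S node
            let node_hpo := adj.foldl (fun node_hpo nb =>
                if pvLookupC adj nb.1 = "green" ∧ pvLookupI po nb.1 < pvLookupI po node then
                  (if hpo.getD nb.1 0 > node_hpo then hpo.getD nb.1 0 else node_hpo)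
                else if pvLookupC adj nb.1 = "red" ∧ pvLookupI po nb.1 > node_hpo then
                  pvLookupI po nb.1
                else node_hpo)
              (pvLookupI po node)
            hpo.insert node node_hpo) PySem.Dict.empty
      = (po.foldl (fun arr p => PySem.List.pySetD arr (pvLookupI po p.1 - 1) p.1)
          (List.replicate po.length "")).foldl
            (fun memo node => (pvHpoB S po (po.length + 1) memo node).1) PySem.Dict.empty :=
        pv_main S po hnk hedges _ [] PySem.Dict.empty
          (by simpa using hnodupA) (by simpa using hpwA)
          (by simpa using fun k hk => (hmemA k).1 hk)
          (by simpa using fun k hk => (hmemA k).2 hk)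
          PySem.Dict.keys_empty
    _ = ((PySem.List.pyRange 1 ((po.length : Int) + 1) 1).map
            (fun v => (po.foldl (fun (d : PySem.Dict Int String) p => d.insert p.2 p.1)
              PySem.Dict.empty).getD v "")).foldl
            (fun memo node => (pvHpoB S po (po.length + 1) memo node).1) PySem.Dict.empty := by
        rw [pv_order_eq po hnk hperm]
    _ = (PySem.List.pyRange 1 ((po.length : Int) + 1) 1).foldl
            (fun memo v => (pvHpoB S po (po.length + 1) memo
              ((po.foldl (fun (d : PySem.Dict Int String) p => d.insert p.2 p.1)
                PySem.Dict.empty).getD v "")).1) PySem.Dict.empty :=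
        List.foldl_map
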